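-- pv_equiv track=rewrite | github.com/DozzzeN/SKG | sorting_index/algorithm.py | adj_rescale
-- ===== SOURCE A (Python) =====
-- def adj_rescale(long):
--     step = 2
--     res = []
--     for i in range(0, len(long), step):
--         tmp = 0
--         for j in range(step):
--             if i + j < len(long):
--                 tmp += long[i + j]
--         res.append(round(tmp / step))
--     return res
-- ===== SOURCE B (Python) =====
-- def adj_rescale(long):
--     res = [round((a + b) / 2) for a, b in zip(long[::2], long[1::2])]
--     if len(long) % 2:
--         res.append(round(long[-1] / 2))
--     return res
-- ===== Notes on version B (the rewrite author's own statement) =====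
-- stated objective: idiomatic
-- what changed: Pairs elements via two strided slices long[::2]/long[1::2] zipped together (plus a lone-tail term for odd length) instead of an index loop with a nested guarded inner accumulation loop.
import Mathlib
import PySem

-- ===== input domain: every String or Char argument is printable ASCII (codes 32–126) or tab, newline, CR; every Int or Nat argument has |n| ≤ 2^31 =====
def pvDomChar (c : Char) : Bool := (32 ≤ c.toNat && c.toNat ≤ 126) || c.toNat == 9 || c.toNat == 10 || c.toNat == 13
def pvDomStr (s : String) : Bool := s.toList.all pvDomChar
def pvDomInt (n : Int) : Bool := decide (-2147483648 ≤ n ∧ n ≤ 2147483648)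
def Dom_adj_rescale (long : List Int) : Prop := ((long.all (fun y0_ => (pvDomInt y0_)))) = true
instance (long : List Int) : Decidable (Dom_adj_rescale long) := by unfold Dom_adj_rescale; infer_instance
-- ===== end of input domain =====

-- B pairs elements via zipped strided slices (long[::2], long[1::2]) plus a lone-tail term,
-- instead of A's index loop with a nested guarded inner accumulation loop (idiomatic decomposition, same cost).


-- round(n / 2) for an int n: Python's round-half-to-even; exact on Dom (float n/2 is exact for |n| ≤ 2^52)
def pvRound2 (n : Int) : Int :=
  let q := PySem.Int.floordiv n 2
  if PySem.Int.mod n 2 = 0 then q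
  else if PySem.Int.mod q 2 = 0 then q else q + 1

-- ===== PORT A =====
def adj_rescale (long : List Int) : List Int :=
  -- step = 2; res = []; for i in range(0, len(long), step): …; return res
  (PySem.List.pyRange 0 (long.length : Int) 2).foldl
    (fun res i =>
      let tmp : Int :=
        -- tmp = 0; for j in range(step): if i + j < len(long): tmp += long[i + j]
        (PySem.List.pyRange 0 2 1).foldl
          (fun tmp j =>
            if i + j < (long.length : Int) then tmp + PySem.List.pyGetD long (i + j) 0 else tmp)
          0
      res ++ [pvRound2 tmp])
    []

-- ===== PORT B =====
def adj_rescale_alt (long : List Int) : List Int :=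
  let evens := (PySem.List.slice? long none none 2).getD []        -- long[::2]
  let odds  := (PySem.List.slice? long (some 1) none 2).getD []    -- long[1::2]
  let res := (evens.zip odds).map (fun p => pvRound2 (p.1 + p.2))
  if PySem.Int.mod (long.length : Int) 2 ≠ 0 then
    res ++ [pvRound2 (PySem.List.pyGetD long (-1) 0)]              -- round(long[-1] / 2)
  else res

-- ===== PRECONDITION & SPEC =====
def Spec_adj_rescale (long : List Int) (out : List Int) : Prop := out = adj_rescale_alt long
instance (long : List Int) (out : List Int) : Decidable (Spec_adj_rescale long out) := by unfold Spec_adj_rescale; infer_instance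

-- ===== CLAIM (what is proved, stated in full; the proofs are below) =====
def Claim_equal_adj_rescale : Prop := ∀ (long : List Int), Dom_adj_rescale long → Spec_adj_rescale long (adj_rescale long)

-- ===== LEMMAS AND PROOFS =====

-- canonical reference: round the mean of each adjacent pair, lone tail halved
def pairRound : List Int → List Int
  | [] => []
  | [a] => [pvRound2 a]
  | a :: b :: rest => pvRound2 (a + b) :: pairRound rest

def evensOf : List Int → List Int
  | [] => []
  | [a] => [a]
  | a :: _ :: rest => a :: evensOf rest

def oddsOf : List Int → List Int
  | [] => []
  | [_] => []
  | _ :: b :: rest => b :: oddsOf rest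

lemma fm_evens (xs : List Int) :
    (List.range ((xs.length+1)/2)).filterMap (fun k => xs[2*k]?) = evensOf xs := by
  induction xs using evensOf.induct with
  | case1 => simp [evensOf]
  | case2 a => simp [evensOf]
  | case3 a b rest ih =>
      have hlen : (a :: b :: rest).length = rest.length + 2 := by simp
      rw [hlen]
      have h2 : (rest.length + 2 + 1)/2 = (rest.length + 1)/2 + 1 := by omega
      rw [h2, List.range_succ_eq_map]
      simp only [List.filterMap_cons, List.filterMap_map]
      have h0 : (a :: b :: rest)[2*0]? = some a := by simp
      rw [h0]
      have hs : ∀ k, ((fun k => (a :: b :: rest)[2*k]?) ∘ Nat.succ) k = (fun k => rest[2*k]?) k := by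
        intro k
        have h3 : 2 * Nat.succ k = (2*k) + 1 + 1 := by omega
        simp [Function.comp, h3]
      rw [funext hs]
      simp [evensOf, ih]

lemma fm_odds (xs : List Int) :
    (List.range (xs.length/2)).filterMap (fun k => xs[2*k+1]?) = oddsOf xs := by
  induction xs using oddsOf.induct with
  | case1 => simp [oddsOf]
  | case2 a => simp [oddsOf]
  | case3 a b rest ih =>
      have hlen : (a :: b :: rest).length = rest.length + 2 := by simp
      rw [hlen]
      have h2 : (rest.length + 2)/2 = rest.length/2 + 1 := by omega
      rw [h2, List.range_succ_eq_map]
      simp only [List.filterMap_cons, List.filterMap_map]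
      have h0 : (a :: b :: rest)[2*0+1]? = some b := by simp
      rw [h0]
      have hs : ∀ k, ((fun k => (a :: b :: rest)[2*k+1]?) ∘ Nat.succ) k = (fun k => rest[2*k+1]?) k := by
        intro k
        have h3 : 2 * Nat.succ k + 1 = (2*k+1) + 1 + 1 := by omega
        simp [Function.comp, h3]
      rw [funext hs]
      simp [oddsOf, ih]

lemma slice2_evens (xs : List Int) :
    PySem.List.slice? xs none none 2 = some (evensOf xs) := by
  rw [← fm_evens]
  simp only [PySem.List.slice?, PySem.List.sliceIndices]
  norm_num
  have hc : (if 0 < xs.length then (((xs.length : Int) + 2 - 1)/2).toNat else 0) = (xs.length+1)/2 := by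
    split <;> omega
  rw [hc]
  apply List.filterMap_congr
  intro x _
  congr 1

lemma slice2_odds (xs : List Int) :
    PySem.List.slice? xs (some 1) none 2 = some (oddsOf xs) := by
  rw [← fm_odds]
  simp only [PySem.List.slice?, PySem.List.sliceIndices]
  norm_num
  have hc : (if 1 < xs.length then (((xs.length : Int) - min 1 (xs.length : Int) + 2 - 1)/2).toNat else 0) = xs.length/2 := by
    split <;> omega
  rw [hc]
  apply List.filterMap_congr
  intro x hx
  rw [List.mem_range] at hx
  congr 1
  omega

lemma pyGetD_last (xs : List Int) (h : xs ≠ []) :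
    PySem.List.pyGetD xs (-1) 0 = xs.getD (xs.length - 1) 0 := by
  have hn : 1 ≤ xs.length := List.length_pos_iff.mpr h
  simp only [PySem.List.pyGetD, PySem.List.pyGet?, PySem.List.pyIdx?]
  have : ¬ ((0:Int) ≤ -1) := by omega
  rw [if_neg this, if_pos (by omega : -(xs.length:Int) ≤ -1)]
  simp [List.getD_eq_getElem?_getD]

lemma alt_eq_pairRound (xs : List Int) : adj_rescale_alt xs = pairRound xs := by
  unfold adj_rescale_alt
  rw [slice2_evens, slice2_odds]
  simp only [Option.getD_some]
  induction xs using pairRound.induct with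
  | case1 => simp [evensOf, oddsOf, pairRound, PySem.Int.mod]
  | case2 a =>
      simp [evensOf, oddsOf, pairRound, PySem.Int.mod, PySem.List.pyGetD,
        PySem.List.pyGet?, PySem.List.pyIdx?]
  | case3 a b rest ih =>
      have hmod : PySem.Int.mod (((a :: b :: rest).length : Int)) 2
          = PySem.Int.mod ((rest.length : Int)) 2 := by
        unfold PySem.Int.mod
        have h1 : ((a :: b :: rest).length : Int) = (rest.length : Int) + 2 * 1 := by
          simp; ring
        rw [h1, Int.add_mul_fmod_self_left]
      simp only [evensOf, oddsOf, List.zip_cons_cons, List.map_cons, hmod]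
      by_cases h : PySem.Int.mod ((rest.length : Int)) 2 ≠ 0
      · rw [if_pos h] at ih ⊢
        have hne : rest ≠ [] := by
          intro hrest
          subst hrest
          simp [PySem.Int.mod] at h
        have hlast : PySem.List.pyGetD (a :: b :: rest) (-1) 0
            = PySem.List.pyGetD rest (-1) 0 := by
          rw [pyGetD_last _ (by simp), pyGetD_last _ hne]
          have hn : 1 ≤ rest.length := List.length_pos_iff.mpr hne
          simp only [List.length_cons]
          have h1 : rest.length + 1 + 1 - 1 = (rest.length - 1) + 1 + 1 := by omega
          rw [h1]
          simp
        simp only [pairRound, List.cons_append]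
        exact congrArg _ (by rw [hlast]; exact ih)
      · rw [if_neg h] at ih ⊢
        simp only [pairRound]
        exact congrArg _ ih

lemma a_core (xs : List Int) :
    List.flatMap
      (fun (a : ℕ) =>
        [pvRound2
            (if 2 * (a:Int) + 1 < (xs.length:Int) then
              (if 2 * (a:Int) < (xs.length:Int) then PySem.List.pyGetD xs (2 * (a:Int)) 0 else 0) +
                PySem.List.pyGetD xs (2 * (a:Int) + 1) 0
            else if 2 * (a:Int) < (xs.length:Int) then PySem.List.pyGetD xs (2 * (a:Int)) 0 else 0)])
      (List.range ((xs.length + 1) / 2)) = pairRound xs := by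
  induction xs using pairRound.induct with
  | case1 => simp [pairRound]
  | case2 a =>
      norm_num [pairRound, PySem.List.pyGetD, PySem.List.pyGet?, PySem.List.pyIdx?]
  | case3 x y rest ih =>
      have hlen : (x :: y :: rest).length = rest.length + 2 := by simp
      rw [hlen]
      have h2 : (rest.length + 2 + 1)/2 = (rest.length + 1)/2 + 1 := by omega
      rw [h2, List.range_succ_eq_map, List.flatMap_cons, List.flatMap_map]
      have hget0 : PySem.List.pyGetD (x :: y :: rest) (2 * ((0:ℕ):Int)) 0 = x := by
        have : 2 * ((0:ℕ):Int) = ((0:ℕ):Int) := by norm_num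
        rw [this, PySem.List.pyGetD_natCast]
        rfl
      have hget1 : PySem.List.pyGetD (x :: y :: rest) (2 * ((0:ℕ):Int) + 1) 0 = y := by
        have : 2 * ((0:ℕ):Int) + 1 = ((1:ℕ):Int) := by norm_num
        rw [this, PySem.List.pyGetD_natCast]
        rfl
      rw [if_pos (by push_cast; omega), if_pos (by push_cast; omega), hget0, hget1]
      have hs : ∀ (a : ℕ),
          (fun (a : ℕ) =>
            [pvRound2
                (if 2 * ((Nat.succ a : ℕ):Int) + 1 < ((rest.length + 2 : ℕ):Int) then
                  (if 2 * ((Nat.succ a : ℕ):Int) < ((rest.length + 2 : ℕ):Int) then PySem.List.pyGetD (x :: y :: rest) (2 * ((Nat.succ a : ℕ):Int)) 0 else 0) +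
                    PySem.List.pyGetD (x :: y :: rest) (2 * ((Nat.succ a : ℕ):Int) + 1) 0
                else if 2 * ((Nat.succ a : ℕ):Int) < ((rest.length + 2 : ℕ):Int) then PySem.List.pyGetD (x :: y :: rest) (2 * ((Nat.succ a : ℕ):Int)) 0 else 0)]) a
          = (fun (a : ℕ) =>
            [pvRound2
                (if 2 * (a:Int) + 1 < (rest.length:Int) then
                  (if 2 * (a:Int) < (rest.length:Int) then PySem.List.pyGetD rest (2 * (a:Int)) 0 else 0) +
                    PySem.List.pyGetD rest (2 * (a:Int) + 1) 0
                else if 2 * (a:Int) < (rest.length:Int) then PySem.List.pyGetD rest (2 * (a:Int)) 0 else 0)]) a := by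
        intro a
        have e0 : 2 * ((Nat.succ a : ℕ):Int) = ((2 * a + 2 : ℕ) : Int) := by push_cast; ring

        have g0 : PySem.List.pyGetD (x :: y :: rest) (((2 * a + 2 : ℕ) : Int)) 0
            = PySem.List.pyGetD rest (2 * (a:Int)) 0 := by
          rw [PySem.List.pyGetD_natCast]
          have : ((2 * a : ℕ) : Int) = 2 * (a:Int) := by push_cast; ring
          rw [← this, PySem.List.pyGetD_natCast]
          simp
        have g1 : PySem.List.pyGetD (x :: y :: rest) (((2 * a + 2 : ℕ) : Int) + 1) 0
            = PySem.List.pyGetD rest (2 * (a:Int) + 1) 0 := by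
          have e3 : ((2 * a + 2 : ℕ) : Int) + 1 = ((2 * a + 3 : ℕ) : Int) := by push_cast; ring
          rw [e3, PySem.List.pyGetD_natCast]
          have : ((2 * a + 1 : ℕ) : Int) = 2 * (a:Int) + 1 := by push_cast; ring
          rw [← this, PySem.List.pyGetD_natCast]
          have h3 : 2 * a + 3 = (2 * a + 1) + 1 + 1 := by omega
          rw [h3]
          simp
        simp only [e0, g0, g1]
        congr 1
        by_cases h1 : 2 * (a:Int) + 1 < (rest.length:Int)
        · rw [if_pos (show (((2 * a + 2 : ℕ) : Int) + 1 < ((rest.length + 2 : ℕ):Int)) by push_cast; omega),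
              if_pos h1,
              if_pos (show (((2 * a + 2 : ℕ) : Int) < ((rest.length + 2 : ℕ):Int)) by push_cast; omega),
              if_pos (show (2 * (a:Int) < (rest.length:Int)) by omega)]
        · rw [if_neg (show ¬ (((2 * a + 2 : ℕ) : Int) + 1 < ((rest.length + 2 : ℕ):Int)) by push_cast; omega),
              if_neg h1]
          by_cases h0 : 2 * (a:Int) < (rest.length:Int)
          · rw [if_pos (show (((2 * a + 2 : ℕ) : Int) < ((rest.length + 2 : ℕ):Int)) by push_cast; omega),
                if_pos h0]
          · rw [if_neg (show ¬ (((2 * a + 2 : ℕ) : Int) < ((rest.length + 2 : ℕ):Int)) by push_cast; omega),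
                if_neg h0]
      rw [List.flatMap_congr (fun a _ => hs a), ih]
      rfl

lemma a_eq_pairRound (xs : List Int) : adj_rescale xs = pairRound xs := by
  unfold adj_rescale
  rw [PySem.List.foldl_append_eq_flatMap]
  rw [PySem.List.pyRange_of_pos 0 (xs.length : Int) (by norm_num)]
  have hr : PySem.List.pyRange 0 2 1 = [0, 1] := by decide
  rw [hr]
  simp only [List.foldl_cons, List.foldl_nil, List.flatMap_map, List.nil_append,
    zero_add, add_zero]
  have hc : (if (0:Int) < (xs.length:Int) then (((xs.length:Int) - 0 + 2 - 1)/2).toNat else 0) = (xs.length+1)/2 := by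
    split <;> omega
  rw [hc]
  exact a_core xs

-- ===== VERDICT (by name: the statement is the Claim_ definition above) =====
theorem adj_rescale_spec : Claim_equal_adj_rescale := by
  intro long _
  unfold Spec_adj_rescale
  rw [a_eq_pairRound, alt_eq_pairRound]
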